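-- pv_equiv track=rewrite | github.com/arifkhan1990/Competitive-Programming | Codingninjas/Multidimensional Array/Rotate matrix to the right.py | rotateMatRight
-- ===== SOURCE A (Python) =====
-- def rotateMatRight(mat, n, m, k):
-- 	ans = []
-- 	res = []
--
-- 	k = k%m
-- 	l = m - k
--
-- 	for i in range(l,m):
-- 		x = []
-- 		for j in range(n):
-- 			x.append(mat[j][i])
-- 		ans.append(x)
--
-- 	for i in range(l):
-- 		x = []
-- 		for j in range(n):
-- 			x.append(mat[j][i])
-- 		ans.append(x)
--
-- 	for i in range(n):
-- 		for j in range(m):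
-- 			res.append(ans[j][i])
-- 	return res
-- ===== SOURCE B (Python) =====
-- def rotateMatRight(mat, n, m, k):
--     k = k % m
--     res = []
--     for i in range(n):
--         for j in range(m):
--             res.append(mat[i][(j - k) % m])
--     return res
-- ===== Notes on version B (the rewrite author's own statement) =====
-- stated objective: simpler
-- what changed: One direct row-major double loop appending mat[i][(j-k)%m], replacing A's three passes (two column-extraction loops building a rotated column-major list plus a transposing flatten pass).
import Mathlib
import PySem

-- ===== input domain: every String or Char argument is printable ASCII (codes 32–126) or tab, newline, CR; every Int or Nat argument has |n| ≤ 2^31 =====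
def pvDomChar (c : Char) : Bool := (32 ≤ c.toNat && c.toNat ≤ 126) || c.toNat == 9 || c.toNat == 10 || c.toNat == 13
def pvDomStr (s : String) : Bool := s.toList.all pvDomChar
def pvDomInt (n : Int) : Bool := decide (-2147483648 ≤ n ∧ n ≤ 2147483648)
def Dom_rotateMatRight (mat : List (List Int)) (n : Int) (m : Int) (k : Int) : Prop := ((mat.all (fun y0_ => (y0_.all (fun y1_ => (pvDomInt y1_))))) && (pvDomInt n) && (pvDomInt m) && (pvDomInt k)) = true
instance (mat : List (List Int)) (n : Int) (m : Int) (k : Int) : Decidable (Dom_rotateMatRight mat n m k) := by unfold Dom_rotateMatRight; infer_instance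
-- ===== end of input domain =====

-- B: one direct row-major double loop reading mat[i][(j-k)%m], replacing A's three passes
-- (two column-extraction loops plus a transposing flatten); same asymptotic cost, simpler.


-- ===== PORT A =====
def rotateMatRight (mat : List (List Int)) (n : Int) (m : Int) (k : Int) : List Int :=
  let k1 := PySem.Int.mod k m
  let l := m - k1
  let ans1 := (PySem.List.pyRange l m 1).foldl (fun ans i =>
      ans ++ [(PySem.List.pyRange 0 n 1).foldl (fun x j =>
        x ++ [PySem.List.pyGetD (PySem.List.pyGetD mat j []) i 0]) []]) []
  let ans2 := (PySem.List.pyRange 0 l 1).foldl (fun ans i =>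
      ans ++ [(PySem.List.pyRange 0 n 1).foldl (fun x j =>
        x ++ [PySem.List.pyGetD (PySem.List.pyGetD mat j []) i 0]) []]) ans1
  (PySem.List.pyRange 0 n 1).foldl (fun res i =>
      (PySem.List.pyRange 0 m 1).foldl (fun res j =>
        res ++ [PySem.List.pyGetD (PySem.List.pyGetD ans2 j []) i 0]) res) []

-- ===== PORT B =====
def rotateMatRight_alt (mat : List (List Int)) (n : Int) (m : Int) (k : Int) : List Int :=
  let k1 := PySem.Int.mod k m
  (PySem.List.pyRange 0 n 1).foldl (fun res i =>
      (PySem.List.pyRange 0 m 1).foldl (fun res j =>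
        res ++ [PySem.List.pyGetD (PySem.List.pyGetD mat i [])
                  (PySem.Int.mod (j - k1) m) 0]) res) []

-- ===== PRECONDITION & SPEC =====
-- Pre_ excludes exactly the inputs where the Python A raises: m = 0 (ZeroDivisionError in k % m),
-- and, when 0 < m, matrices with fewer than n rows or with one of the first n rows shorter
-- than m (IndexError in mat[j][i]).
def Pre_rotateMatRight (mat : List (List Int)) (n : Int) (m : Int) (k : Int) : Prop :=
  m ≠ 0 ∧ (0 < m → n.toNat ≤ mat.length ∧ ∀ row ∈ mat.take n.toNat, m ≤ (row.length : Int))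
instance (mat : List (List Int)) (n : Int) (m : Int) (k : Int) : Decidable (Pre_rotateMatRight mat n m k) := by unfold Pre_rotateMatRight; infer_instance

def pvWitness_rotateMatRight : List (List Int) × Int × Int × Int := ([[1, 2], [3, 4]], 2, 2, 1)

def Spec_rotateMatRight (mat : List (List Int)) (n : Int) (m : Int) (k : Int) (out : List Int) : Prop := out = rotateMatRight_alt mat n m k
instance (mat : List (List Int)) (n : Int) (m : Int) (k : Int) (out : List Int) : Decidable (Spec_rotateMatRight mat n m k out) := by unfold Spec_rotateMatRight; infer_instance

-- ===== CLAIM (what is proved, stated in full; the proofs are below) =====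
def Claim_equal_rotateMatRight : Prop := ∀ (mat : List (List Int)) (n : Int) (m : Int) (k : Int), Dom_rotateMatRight mat n m k → Pre_rotateMatRight mat n m k → Spec_rotateMatRight mat n m k (rotateMatRight mat n m k)

-- ===== LEMMAS AND PROOFS =====

theorem flatMap_congr_mem {α β : Type} {l : List α} {f g : α → List β}
    (h : ∀ x ∈ l, f x = g x) : l.flatMap f = l.flatMap g := by
  induction l with
  | nil => rfl
  | cons a t ih =>
      simp only [List.flatMap_cons, h a (List.mem_cons_self ..),
        ih (fun x hx => h x (List.mem_cons_of_mem _ hx))]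

-- Python '%' with a positive divisor picks the representative in [0, m)
theorem pymod_eq (a m r q : Int) (hm : 0 < m) (h : a = r + m * q)
    (h0 : 0 ≤ r) (h1 : r < m) : PySem.Int.mod a m = r := by
  rw [PySem.Int.mod_eq_emod_of_pos hm, h, Int.add_mul_emod_self_left,
    Int.emod_eq_of_lt h0 h1]


-- indexing the concatenation of the two column ranges A builds (columns b-a..b-1 then 0..b-a-1)
theorem pyGetD_append_map_ranges {b_ : Type} (f : Int -> b_) (a b j : Int) (d : b_)
    (ha : 0 <= a) (hab : a <= b) (hj0 : 0 <= j) (hjb : j < b) :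
    PySem.List.pyGetD ((PySem.List.pyRange a b 1).map f ++ (PySem.List.pyRange 0 a 1).map f) j d
      = f (if j < b - a then a + j else j - (b - a)) := by
  have h1 : (PySem.List.pyRange a b 1).length = (b - a).toNat := PySem.List.length_pyRange_one a b
  have h2 : (PySem.List.pyRange 0 a 1).length = a.toNat := by
    simp [PySem.List.length_pyRange_one]
  rw [PySem.List.pyGetD_eq_getElem _ d hj0 (by simp [h1, h2]; omega)]
  by_cases hc : j < b - a
  · rw [List.getElem_append_left (by simp [h1]; omega), List.getElem_map,
      PySem.List.getElem_pyRange_one, if_pos hc]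
    congr 1
    omega
  · rw [List.getElem_append_right (by simp [h1]; omega), List.getElem_map,
      PySem.List.getElem_pyRange_one, if_neg hc]
    congr 1
    simp [h1]
    omega

theorem rotateMatRight_spec : Claim_equal_rotateMatRight := by
  intro mat n m k _ hpre
  obtain ⟨hm, -⟩ := hpre
  unfold Spec_rotateMatRight rotateMatRight rotateMatRight_alt
  simp only [PySem.List.foldl_append_singleton_eq_map,
    PySem.List.foldl_append_eq_flatMap, List.nil_append]
  rcases lt_or_gt_of_ne hm with hneg | hpos
  · simp [PySem.List.pyRange_one_eq_nil (by omega : m ≤ (0 : Int))]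
  · have hK0 : 0 ≤ PySem.Int.mod k m := PySem.Int.mod_nonneg k hpos
    have hKm : PySem.Int.mod k m < m := PySem.Int.mod_lt k hpos
    refine flatMap_congr_mem (fun i hi => ?_)
    rw [PySem.List.mem_pyRange_one] at hi
    refine List.map_congr_left (fun j hj => ?_)
    rw [PySem.List.mem_pyRange_one] at hj
    rw [pyGetD_append_map_ranges _ (m - PySem.Int.mod k m) m j [] (by omega) (by omega)
      hj.1 hj.2]
    rw [PySem.List.pyGetD_map_pyRange_of_nonneg _ n i 0 hi.1 hi.2]
    congr 1
    split_ifs with hc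
    · exact (pymod_eq _ _ _ (-1) hpos (by ring) (by omega) (by omega)).symm
    · exact (pymod_eq _ _ _ 0 hpos (by ring) (by omega) (by omega)).symm
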